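-- pv_equiv track=rewrite | github.com/ShashankReddy1207/summer-training-batch1 | day 12/print the sum of values of two list even odd.py | rec1
-- ===== SOURCE A (Python) =====
-- def rec1(e,l2,l3,id,le,y):
--     if id==le:
--         return l3
--     else:
--         if l2[id]%2!=0:
--             y=y+e+l2[id]
--             l3.append(y)
--         return rec1(e,l2,l3,id+1,le,y)
-- ===== SOURCE B (Python) =====
-- def rec1(e, l2, l3, id, le, y):
--     for i in range(id, le):
--         v = l2[i]
--         if v % 2 != 0:
--             y = y + e + v
--             l3.append(y)
--     return l3
-- ===== Notes on version B (the rewrite author's own statement) =====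
-- stated objective: idiomatic
-- what changed: Replaced the argument-threading recursion with a single for-loop over range(id, le) carrying the running sum.
import Mathlib
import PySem

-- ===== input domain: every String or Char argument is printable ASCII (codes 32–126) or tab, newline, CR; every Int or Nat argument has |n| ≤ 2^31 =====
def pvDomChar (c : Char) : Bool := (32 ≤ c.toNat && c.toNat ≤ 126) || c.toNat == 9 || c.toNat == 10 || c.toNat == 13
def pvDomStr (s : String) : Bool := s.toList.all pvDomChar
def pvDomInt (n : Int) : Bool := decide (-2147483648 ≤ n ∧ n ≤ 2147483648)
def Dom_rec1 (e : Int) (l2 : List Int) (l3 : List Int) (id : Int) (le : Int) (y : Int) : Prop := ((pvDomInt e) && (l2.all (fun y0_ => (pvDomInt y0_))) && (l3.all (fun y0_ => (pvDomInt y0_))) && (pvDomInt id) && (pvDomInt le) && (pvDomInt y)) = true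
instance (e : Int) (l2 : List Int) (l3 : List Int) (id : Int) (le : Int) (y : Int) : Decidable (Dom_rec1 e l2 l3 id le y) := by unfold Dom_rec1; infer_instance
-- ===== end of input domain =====

-- B replaces A's argument-threading recursion by a single for-loop over range(id, le)
-- carrying the running sum (idiomatic; return value only — both mutate/return l3 the same way).

-- ===== PORT A =====
-- literal port of the recursion; the two guards only make it total:
-- 'none' (IndexError) and 'id > le' (unbounded recursion) are excluded by Pre_rec1.
def rec1 (e : Int) (l2 : List Int) (l3 : List Int) (id : Int) (le : Int) (y : Int) : List Int :=
  if id = le then l3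
  else
    match PySem.List.pyGet? l2 id with
    | none => l3  -- IndexError in Python; outside Pre_rec1
    | some v =>
      let y' := if PySem.Int.mod v 2 ≠ 0 then y + e + v else y
      let l3' := if PySem.Int.mod v 2 ≠ 0 then l3 ++ [y'] else l3
      if id < le then rec1 e l2 l3' (id + 1) le y'
      else l3  -- id > le: Python recurses forever (RecursionError); outside Pre_rec1
termination_by (le - id).toNat
decreasing_by omega

-- ===== PORT B =====
def rec1_alt (e : Int) (l2 : List Int) (l3 : List Int) (id : Int) (le : Int) (y : Int) : List Int :=
  ((PySem.List.pyRange id le 1).foldl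
    (fun (st : List Int × Int) i =>
      match PySem.List.pyGet? l2 i with
      | none => st  -- IndexError in Python; outside Pre_rec1
      | some v =>
        if PySem.Int.mod v 2 ≠ 0 then (st.1 ++ [st.2 + e + v], st.2 + e + v) else st)
    (l3, y)).1

-- ===== PRECONDITION & SPEC =====
-- Pre_ excludes id > le (A recurses forever: RecursionError) and out-of-range
-- indices in [id, le) (A raises IndexError); everywhere A returns, Pre_ holds.
def Pre_rec1 (e : Int) (l2 : List Int) (l3 : List Int) (id : Int) (le : Int) (y : Int) : Prop :=
  id ≤ le ∧ (id < le → -(l2.length : Int) ≤ id ∧ le ≤ (l2.length : Int))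
instance (e : Int) (l2 : List Int) (l3 : List Int) (id : Int) (le : Int) (y : Int) : Decidable (Pre_rec1 e l2 l3 id le y) := by unfold Pre_rec1; infer_instance

def pvWitness_rec1 : Int × List Int × List Int × Int × Int × Int := (2, [1, 4, 3], [], 0, 3, 0)

def Spec_rec1 (e : Int) (l2 : List Int) (l3 : List Int) (id : Int) (le : Int) (y : Int) (out : List Int) : Prop := out = rec1_alt e l2 l3 id le y
instance (e : Int) (l2 : List Int) (l3 : List Int) (id : Int) (le : Int) (y : Int) (out : List Int) : Decidable (Spec_rec1 e l2 l3 id le y out) := by unfold Spec_rec1; infer_instance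

-- ===== CLAIM (what is proved, stated in full; the proofs are below) =====
def Claim_equal_rec1 : Prop := ∀ (e : Int) (l2 : List Int) (l3 : List Int) (id : Int) (le : Int) (y : Int), Dom_rec1 e l2 l3 id le y → Pre_rec1 e l2 l3 id le y → Spec_rec1 e l2 l3 id le y (rec1 e l2 l3 id le y)

-- ===== LEMMAS AND PROOFS =====

theorem rec1_eq_alt_aux (e : Int) (l2 : List Int) (le : Int) :
    ∀ (n : Nat) (id : Int) (l3 : List Int) (y : Int), (le - id).toNat ≤ n →
      id ≤ le → (id < le → -(l2.length : Int) ≤ id ∧ le ≤ (l2.length : Int)) →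
      rec1 e l2 l3 id le y = rec1_alt e l2 l3 id le y := by
  intro n
  induction n with
  | zero =>
    intro id l3 y hn hle _
    have hid : id = le := by omega
    subst hid
    rw [rec1, rec1_alt, PySem.List.pyRange_one_eq_nil (by omega)]
    simp
  | succ n ih =>
    intro id l3 y hn hle hbound
    by_cases hid : id = le
    · subst hid
      rw [rec1, rec1_alt, PySem.List.pyRange_one_eq_nil (by omega)]
      simp
    · have hlt : id < le := by omega
      obtain ⟨h1, h2⟩ := hbound hlt
      obtain ⟨v, hv⟩ : ∃ v, PySem.List.pyGet? l2 id = some v := by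
        cases h : PySem.List.pyGet? l2 id with
        | none =>
          rw [PySem.List.pyGet?_eq_none_iff] at h
          exact absurd (by unfold PySem.Raise.InRange; omega) h
        | some v => exact ⟨v, rfl⟩
      rw [rec1, rec1_alt, PySem.List.pyRange_one_cons hlt]
      simp only [if_neg hid, hv, if_pos hlt, List.foldl_cons]
      by_cases hodd : PySem.Int.mod v 2 ≠ 0
      · simp only [if_pos hodd]
        rw [ih (id + 1) (l3 ++ [y + e + v]) (y + e + v) (by omega) (by omega)
              (fun h => ⟨by omega, h2⟩)]
        rfl
      · simp only [if_neg hodd]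
        rw [ih (id + 1) l3 y (by omega) (by omega) (fun h => ⟨by omega, h2⟩)]
        rfl

-- ===== VERDICT (by name: the statement is the Claim_ definition above) =====
theorem rec1_spec : Claim_equal_rec1 := by
  intro e l2 l3 id le y _ hpre
  exact rec1_eq_alt_aux e l2 le ((le - id).toNat) id l3 y (by omega) hpre.1 hpre.2
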